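-- pv_equiv track=rewrite | github.com/jonwilks/recipe-duck | lambda/lambda_handler.py | is_email_whitelisted
-- ===== SOURCE A (Python) =====
-- def is_email_whitelisted(sender_email: str, whitelist: str) -> bool:
--     """Check if sender email is in whitelist.
--
--     Args:
--         sender_email: Email address of sender
--         whitelist: Comma-separated list of allowed emails (supports wildcards)
--
--     Returns:
--         True if email is whitelisted, False otherwise
--     """
--     sender_email = sender_email.lower().strip()
--     allowed_emails = [email.strip().lower() for email in whitelist.split(',')]
--
--     for allowed in allowed_emails:
--         if allowed == sender_email:
--             return True
--         # Support wildcard domain matching: *@example.com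
--         if allowed.startswith('*@'):
--             domain = allowed[2:]
--             if sender_email.endswith(f'@{domain}'):
--                 return True
--
--     return False
-- ===== SOURCE B (Python) =====
-- def is_email_whitelisted(sender_email: str, whitelist: str) -> bool:
--     """Check if sender email is in whitelist (supports *@domain wildcards).
--
--     Instead of scanning the whitelist for wildcard entries, build a set of the
--     normalized entries once and generate, from the '@' positions in the sender
--     address itself, every wildcard pattern that could match it, looking each
--     candidate up in the set. Correct because entry '*@d' matches the sender
--     exactly when '@d' is a suffix of the sender, i.e. when '*@' + sender[i+1:]
--     equals the entry for some i with sender[i] == '@'.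
--     """
--     sender = sender_email.lower().strip()
--     entries = {e.strip().lower() for e in whitelist.split(',')}
--     if sender in entries:
--         return True
--     for i in range(len(sender)):
--         if sender[i] == '@' and '*@' + sender[i + 1:] in entries:
--             return True
--     return False
-- ===== Notes on version B (the rewrite author's own statement) =====
-- stated objective: alternative
-- what changed: B inverts the matching direction: it builds a set of the normalized whitelist entries once and then generates, from each '@' position in the sender address itself, the candidate pattern '*@' + suffix and looks it up in the set, instead of A's scan of the whitelist that tests each entry against the sender.
import Mathlib
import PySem

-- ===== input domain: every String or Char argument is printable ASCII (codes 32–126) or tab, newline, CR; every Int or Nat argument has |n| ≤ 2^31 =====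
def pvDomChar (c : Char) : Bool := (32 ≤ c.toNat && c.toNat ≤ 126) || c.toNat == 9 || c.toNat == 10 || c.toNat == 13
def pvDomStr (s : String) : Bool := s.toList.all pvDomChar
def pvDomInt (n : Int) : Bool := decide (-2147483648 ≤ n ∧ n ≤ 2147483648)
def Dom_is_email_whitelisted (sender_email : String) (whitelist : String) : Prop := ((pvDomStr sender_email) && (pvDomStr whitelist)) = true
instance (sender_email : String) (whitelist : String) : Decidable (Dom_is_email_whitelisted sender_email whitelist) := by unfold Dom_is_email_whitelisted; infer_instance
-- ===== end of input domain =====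

-- B inverts the matching direction: instead of scanning the whitelist for wildcard entries it
-- builds a set of the normalized entries once and generates, from the '@' positions of the
-- sender itself, every wildcard pattern '*@' + suffix that could match, looking each up in
-- the set ("alternative": a different algorithm, same return value).

-- ===== PORT A =====
-- A's for-loop with its two early returns, as structural recursion over the entry list.
def isWlLoopA (sender : String) : List String → Bool
  | [] => false
  | allowed :: rest =>
    if allowed == sender then true
    else if PySem.Str.startswith allowed "*@" then
      let domain := PySem.Str.slice allowed (some 2) none
      if PySem.Str.endswith sender ("@" ++ domain) then true
      else isWlLoopA sender rest
    else isWlLoopA sender rest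

def is_email_whitelisted (sender_email : String) (whitelist : String) : Bool :=
  let sender := PySem.Str.strip (PySem.Str.lower sender_email)
  -- whitelist.split(',') : separator nonempty, so split? always returns some
  let allowed_emails :=
    ((PySem.Str.split? whitelist ",").getD []).map
      (fun email => PySem.Str.lower (PySem.Str.strip email))
  isWlLoopA sender allowed_emails

-- ===== PORT B =====
-- Source B's candidate loop: 'for i in range(len(sender)): if sender[i]=="@" and "*@"+sender[i+1:] in entries'.
def wlCandLoopB (sender : String) (entries : PySem.Set String) : List Int → Bool
  | [] => false
  | i :: rest =>
    if PySem.Str.pyGet? sender i == some '@'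
        && PySem.Set.contains entries ("*@" ++ PySem.Str.slice sender (some (i + 1)) none) then
      true
    else wlCandLoopB sender entries rest

def is_email_whitelisted_alt (sender_email : String) (whitelist : String) : Bool :=
  let sender := PySem.Str.strip (PySem.Str.lower sender_email)
  let entries : PySem.Set String :=
    PySem.Set.ofList
      (((PySem.Str.split? whitelist ",").getD []).map
        (fun e => PySem.Str.lower (PySem.Str.strip e)))
  if PySem.Set.contains entries sender then true
  else wlCandLoopB sender entries (PySem.List.pyRange 0 (PySem.Str.len sender) 1)

-- ===== PRECONDITION & SPEC =====
def Spec_is_email_whitelisted (sender_email : String) (whitelist : String) (out : Bool) : Prop := out = is_email_whitelisted_alt sender_email whitelist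
instance (sender_email : String) (whitelist : String) (out : Bool) : Decidable (Spec_is_email_whitelisted sender_email whitelist out) := by unfold Spec_is_email_whitelisted; infer_instance

-- ===== CLAIM (what is proved, stated in full; the proofs are below) =====
def Claim_equal_is_email_whitelisted : Prop := ∀ (sender_email : String) (whitelist : String), Dom_is_email_whitelisted sender_email whitelist → Spec_is_email_whitelisted sender_email whitelist (is_email_whitelisted sender_email whitelist)

-- ===== LEMMAS AND PROOFS =====

-- A's loop is the Boolean 'some entry matches exactly or by wildcard'.
theorem loopA_iff (s : String) (l : List String) :
    isWlLoopA s l = true ↔ ∃ e ∈ l, e = s ∨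
      (PySem.Str.startswith e "*@" = true ∧
        PySem.Str.endswith s ("@" ++ PySem.Str.slice e (some 2) none) = true) := by
  induction l with
  | nil => simp [isWlLoopA]
  | cons e rest ih =>
    rw [List.exists_mem_cons_iff]
    simp only [isWlLoopA]
    split_ifs with h1 h2 h3
    · rw [beq_iff_eq] at h1
      exact iff_of_true rfl (Or.inl (Or.inl h1))
    · exact iff_of_true rfl (Or.inl (Or.inr ⟨h2, h3⟩))
    · rw [ih]
      constructor
      · exact fun hx => Or.inr hx
      · rintro (h | hx)
        · rcases h with rfl | ⟨_, hend⟩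
          · simp at h1
          · exact absurd hend h3
        · exact hx
    · rw [ih]
      constructor
      · exact fun hx => Or.inr hx
      · rintro (h | hx)
        · rcases h with rfl | ⟨hstart, _⟩
          · simp at h1
          · exact absurd hstart h2
        · exact hx

-- B's candidate loop is the Boolean 'some index carries "@" and yields a whitelisted pattern'.
theorem loopB_iff (s : String) (en : PySem.Set String) (l : List Int) :
    wlCandLoopB s en l = true ↔ ∃ i ∈ l, PySem.Str.pyGet? s i = some '@' ∧
      PySem.Set.contains en ("*@" ++ PySem.Str.slice s (some (i + 1)) none) = true := by
  induction l with
  | nil => simp [wlCandLoopB]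
  | cons i rest ih =>
    rw [List.exists_mem_cons_iff]
    simp only [wlCandLoopB]
    split_ifs with h
    · rw [Bool.and_eq_true, beq_iff_eq] at h
      exact iff_of_true rfl (Or.inl h)
    · rw [Bool.and_eq_true, beq_iff_eq] at h
      rw [ih]
      constructor
      · exact fun hx => Or.inr hx
      · rintro (hc | hx)
        · exact absurd hc h
        · exact hx

theorem containsSet_iff (l : List String) (x : String) :
    PySem.Set.contains l x = true ↔ x ∈ l := by
  simp [PySem.Set.contains]

-- THE algorithmic pivot: entry e wildcard-matches sender s  iff  e equals '*@' + (the suffix of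
-- s after some '@').
theorem wild_iff (s e : String) :
    (PySem.Str.startswith e "*@" = true ∧
      PySem.Str.endswith s ("@" ++ PySem.Str.slice e (some 2) none) = true)
    ↔ ∃ i : Int, (0 ≤ i ∧ i < (s.toList.length : Int)) ∧
        PySem.Str.pyGet? s i = some '@' ∧
        "*@" ++ PySem.Str.slice s (some (i + 1)) none = e := by
  constructor
  · rintro ⟨h1, h2⟩
    rw [PySem.Str.startswith_eq, PySem.Chars.startswith_iff] at h1
    obtain ⟨d, hd⟩ := h1
    have hsl : (PySem.Str.slice e (some 2) none).toList = d := by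
      rw [PySem.Str.toList_slice, PySem.Chars.slice_eq_listSlice,
        PySem.List.slice_from _ (by norm_num), ← hd]
      rfl
    rw [PySem.Str.endswith_eq, PySem.Chars.endswith_iff, String.toList_append, hsl] at h2
    obtain ⟨t, ht⟩ := h2
    have ht' : s.toList = t ++ '@' :: d := by rw [← ht]; rfl
    have hlen : s.toList.length = t.length + (d.length + 1) := by rw [ht']; simp
    refine ⟨(t.length : Int),
      ⟨by positivity, by exact_mod_cast (show t.length < s.toList.length by omega)⟩, ?_, ?_⟩
    · rw [PySem.Str.pyGet?_natCast, ht']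
      simp
    · rw [← String.toList_inj, String.toList_append, PySem.Str.toList_slice,
        PySem.Chars.slice_eq_listSlice,
        show ((t.length : Int) + 1) = (((t.length + 1 : Nat)) : Int) by push_cast; ring,
        PySem.List.slice_from _ (by positivity), Int.toNat_natCast, ht', ← hd]
      congr 1
      have : List.drop (t.length + 1) (t ++ '@' :: d) = List.drop 1 ('@' :: d) := by
        exact List.drop_length_add_append 1
      rw [this]
      rfl
  · rintro ⟨i, ⟨h0, hlt⟩, hget, heq⟩
    lift i to ℕ using h0 with k
    rw [PySem.Str.pyGet?_natCast] at hget
    have hk : k < s.toList.length := by exact_mod_cast hlt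
    have hat : s.toList[k] = '@' := by
      have h' := hget
      rw [List.getElem?_eq_getElem hk] at h'
      exact Option.some.inj h'
    have hsl2 : (PySem.Str.slice s (some ((k : Int) + 1)) none).toList
        = s.toList.drop (k + 1) := by
      rw [PySem.Str.toList_slice, PySem.Chars.slice_eq_listSlice,
        show ((k : Int) + 1) = (((k + 1 : Nat)) : Int) by push_cast; ring,
        PySem.List.slice_from _ (by positivity), Int.toNat_natCast]
    constructor
    · rw [PySem.Str.startswith_eq, PySem.Chars.startswith_iff, ← heq, String.toList_append]
      exact ⟨_, rfl⟩
    · rw [PySem.Str.endswith_eq, PySem.Chars.endswith_iff]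
      have hesl : (PySem.Str.slice e (some 2) none).toList = s.toList.drop (k + 1) := by
        rw [PySem.Str.toList_slice, PySem.Chars.slice_eq_listSlice,
          PySem.List.slice_from _ (by norm_num), ← heq, String.toList_append, hsl2]
        rfl
      rw [String.toList_append, hesl]
      have hcons : ("@".toList) ++ s.toList.drop (k + 1) = s.toList.drop k := by
        rw [List.drop_eq_getElem_cons hk, hat]
        rfl
      rw [hcons]
      exact List.drop_suffix k s.toList

-- Putting it together for one fixed entry list L and sender s.
theorem core_eq (s : String) (L : List String) :
    isWlLoopA s L =
      (if PySem.Set.contains (PySem.Set.ofList L) s then true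
       else wlCandLoopB s (PySem.Set.ofList L) (PySem.List.pyRange 0 (PySem.Str.len s) 1)) := by
  by_cases hc : PySem.Set.contains (PySem.Set.ofList L) s = true
  · simp only [hc, if_true]
    rw [loopA_iff]
    have hs : s ∈ L := (PySem.Set.mem_ofList L s).mp ((containsSet_iff _ _).mp hc)
    exact ⟨s, hs, Or.inl rfl⟩
  · simp only [hc]
    rw [if_neg Bool.false_ne_true]
    have hns : s ∉ L := fun hmem =>
      hc ((containsSet_iff _ _).mpr ((PySem.Set.mem_ofList L s).mpr hmem))
    rw [Bool.eq_iff_iff, loopA_iff, loopB_iff]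
    constructor
    · rintro ⟨e, he, hmatch⟩
      rcases hmatch with rfl | hw
      · exact absurd he hns
      · obtain ⟨i, ⟨h0, hltl⟩, hget, heq⟩ := (wild_iff s e).mp hw
        refine ⟨i, ?_, hget, ?_⟩
        · rw [PySem.List.mem_pyRange_one, PySem.Str.len_eq]
          exact ⟨h0, hltl⟩
        · rw [containsSet_iff, PySem.Set.mem_ofList, heq]
          exact he
    · rintro ⟨i, hi, hget, hin⟩
      rw [PySem.List.mem_pyRange_one, PySem.Str.len_eq] at hi
      refine ⟨"*@" ++ PySem.Str.slice s (some (i + 1)) none,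
        (PySem.Set.mem_ofList _ _).mp ((containsSet_iff _ _).mp hin),
        Or.inr ((wild_iff s _).mpr ⟨i, hi, hget, rfl⟩)⟩

-- ===== VERDICT (by name: the statement is the Claim_ definition above) =====
theorem is_email_whitelisted_spec : Claim_equal_is_email_whitelisted := by
  intro se w _
  unfold Spec_is_email_whitelisted is_email_whitelisted is_email_whitelisted_alt
  exact core_eq _ _
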